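-- pv_equiv track=rewrite | github.com/raesti/Python-Classification-Twitter | dictionary.py | kategori
-- ===== SOURCE A (Python) =====
-- def kategori(data):
--     hasil1=[]
--     hasil2=[]
--     hasil3=[]
--     hasil4=[]
--     hasil5=[]
--     tempekonomi = {}
--     tempentertaimen = {}
--     tempkesehatan={}
--     tempolahraga={}
--     tempteknologi={}
--     total = {}
--     for a in data:
--         if a[2] == 'ekonomi':
--             for b in a[1]:
--                 hasil1.append(b)
--             tempekonomi[a[2]] = hasil1
--         elif a[2] == 'entertaiment':
--             for c in a[1]:
--                 hasil2.append(c)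
--             tempentertaimen[a[2]] = hasil2
--         elif a[2] == 'kesehatan':
--             for d in a[1]:
--                 hasil3.append(d)
--             tempkesehatan[a[2]] = hasil3
--         elif a[2] == 'olahraga':
--             for e in a[1]:
--                 hasil4.append(e)
--             tempolahraga[a[2]] = hasil4
--         elif a[2] == 'teknologi':
--             for f in a[1]:
--                 hasil5.append(f)
--             tempteknologi[a[2]] = hasil5
--
--     total.update(tempkesehatan)
--     total.update(tempekonomi)
--     total.update(tempentertaimen)
--     total.update(tempolahraga)
--     total.update(tempteknologi)
--     return total
-- ===== SOURCE B (Python) =====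
-- def kategori(data):
--     cats = ('kesehatan', 'ekonomi', 'entertaiment', 'olahraga', 'teknologi')
--     return {c: [w for row in data if row[2] == c for w in row[1]]
--             for c in cats if any(row[2] == c for row in data)}
-- ===== Notes on version B (the rewrite author's own statement) =====
-- stated objective: simpler
-- what changed: Replaces the five parallel accumulator lists, five one-key temp dicts and the five-way if/elif ladder plus .update() merge phase with a single dict comprehension over the fixed category list, collecting each category's words by filtering data.
import Mathlib
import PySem

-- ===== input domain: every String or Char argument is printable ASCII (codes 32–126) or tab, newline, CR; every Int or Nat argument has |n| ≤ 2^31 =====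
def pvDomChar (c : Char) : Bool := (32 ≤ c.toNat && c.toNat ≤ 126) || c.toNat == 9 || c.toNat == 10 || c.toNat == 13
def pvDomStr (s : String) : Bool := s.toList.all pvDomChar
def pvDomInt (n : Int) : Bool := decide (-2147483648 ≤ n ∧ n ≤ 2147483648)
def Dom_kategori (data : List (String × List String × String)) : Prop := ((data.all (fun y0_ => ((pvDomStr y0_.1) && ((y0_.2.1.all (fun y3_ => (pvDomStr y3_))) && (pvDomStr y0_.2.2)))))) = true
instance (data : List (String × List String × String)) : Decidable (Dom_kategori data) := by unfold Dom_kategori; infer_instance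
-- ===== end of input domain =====

-- B replaces A's five parallel lists, five one-key temp dicts and if/elif ladder plus
-- .update() merge with a single dict comprehension over the fixed category list (simpler).


-- ===== PORT A =====
-- loop state: the five hasil lists and the five temp dicts
structure KState where
  h1 : List String
  h2 : List String
  h3 : List String
  h4 : List String
  h5 : List String
  t1 : PySem.Dict String (List String)
  t2 : PySem.Dict String (List String)
  t3 : PySem.Dict String (List String)
  t4 : PySem.Dict String (List String)
  t5 : PySem.Dict String (List String)
  deriving Repr, DecidableEq

def kStep (s : KState) (a : String × List String × String) : KState :=
  if a.2.2 == "ekonomi" then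
    let h1' := a.2.1.foldl (fun l b => l ++ [b]) s.h1
    { s with h1 := h1', t1 := s.t1.insert a.2.2 h1' }
  else if a.2.2 == "entertaiment" then
    let h2' := a.2.1.foldl (fun l c => l ++ [c]) s.h2
    { s with h2 := h2', t2 := s.t2.insert a.2.2 h2' }
  else if a.2.2 == "kesehatan" then
    let h3' := a.2.1.foldl (fun l d => l ++ [d]) s.h3
    { s with h3 := h3', t3 := s.t3.insert a.2.2 h3' }
  else if a.2.2 == "olahraga" then
    let h4' := a.2.1.foldl (fun l e => l ++ [e]) s.h4
    { s with h4 := h4', t4 := s.t4.insert a.2.2 h4' }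
  else if a.2.2 == "teknologi" then
    let h5' := a.2.1.foldl (fun l f => l ++ [f]) s.h5
    { s with h5 := h5', t5 := s.t5.insert a.2.2 h5' }
  else s

def kategori (data : List (String × List String × String)) : List (String × List String) :=
  let s := data.foldl kStep
    ⟨[], [], [], [], [], PySem.Dict.empty, PySem.Dict.empty, PySem.Dict.empty, PySem.Dict.empty, PySem.Dict.empty⟩
  let total : PySem.Dict String (List String) := PySem.Dict.empty
  let total := total.update s.t3.items
  let total := total.update s.t1.items
  let total := total.update s.t2.items
  let total := total.update s.t4.items
  let total := total.update s.t5.items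
  total.items

-- ===== PORT B =====
def kCats : List String := ["kesehatan", "ekonomi", "entertaiment", "olahraga", "teknologi"]

def kategori_alt (data : List (String × List String × String)) : List (String × List String) :=
  (kCats.filter (fun c => data.any (fun row => row.2.2 == c))).map
    (fun c => (c, (data.filter (fun row => row.2.2 == c)).flatMap (fun row => row.2.1)))

-- ===== PRECONDITION & SPEC =====
def Spec_kategori (data : List (String × List String × String)) (out : List (String × List String)) : Prop := out = kategori_alt data
instance (data : List (String × List String × String)) (out : List (String × List String)) : Decidable (Spec_kategori data out) := by unfold Spec_kategori; infer_instance

-- ===== CLAIM (what is proved, stated in full; the proofs are below) =====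
def Claim_equal_kategori : Prop := ∀ (data : List (String × List String × String)), Dom_kategori data → Spec_kategori data (kategori data)

-- ===== LEMMAS AND PROOFS =====

-- words collected for category c, and whether c occurs at all
def kFlat (c : String) (data : List (String × List String × String)) : List String :=
  (data.filter (fun row => row.2.2 == c)).flatMap (fun row => row.2.1)

def kAny (c : String) (data : List (String × List String × String)) : Bool :=
  data.any (fun row => row.2.2 == c)

def kUpd (c : String) (t : PySem.Dict String (List String)) (h : List String)
    (data : List (String × List String × String)) : PySem.Dict String (List String) :=
  if kAny c data then t.insert c (h ++ kFlat c data) else t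

theorem foldl_append_singleton (l acc : List String) :
    l.foldl (fun xs b => xs ++ [b]) acc = acc ++ l := by
  induction l generalizing acc with
  | nil => simp
  | cons x xs ih => simp [List.foldl, ih, List.append_assoc]

theorem kFlat_eq_nil (c : String) (data : List (String × List String × String))
    (h : kAny c data = false) : kFlat c data = [] := by
  simp only [kAny, List.any_eq_false] at h
  simp only [kFlat]
  rw [List.filter_eq_nil_iff.mpr (by intro x hx; simpa using h x hx)]
  rfl

theorem kStep_char (data : List (String × List String × String)) (s : KState) :
    data.foldl kStep s =
      ⟨s.h1 ++ kFlat "ekonomi" data, s.h2 ++ kFlat "entertaiment" data,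
       s.h3 ++ kFlat "kesehatan" data, s.h4 ++ kFlat "olahraga" data,
       s.h5 ++ kFlat "teknologi" data,
       kUpd "ekonomi" s.t1 s.h1 data, kUpd "entertaiment" s.t2 s.h2 data,
       kUpd "kesehatan" s.t3 s.h3 data, kUpd "olahraga" s.t4 s.h4 data,
       kUpd "teknologi" s.t5 s.h5 data⟩ := by
  induction data generalizing s with
  | nil => simp [kFlat, kAny, kUpd]
  | cons a rest ih =>
    have hflat : ∀ c, kFlat c (a :: rest) =
        (if a.2.2 == c then a.2.1 else []) ++ kFlat c rest := by
      intro c; by_cases h : a.2.2 == c <;> simp [kFlat, h]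
    have hany : ∀ c, kAny c (a :: rest) = ((a.2.2 == c) || kAny c rest) := by
      intro c; simp [kAny]
    rw [List.foldl_cons, ih]
    rcases s with ⟨h1, h2, h3, h4, h5, t1, t2, t3, t4, t5⟩
    simp only [kStep, foldl_append_singleton]
    by_cases e1 : a.2.2 == "ekonomi"
    · have e1' : a.2.2 = "ekonomi" := by simpa using e1
      rw [if_pos e1]
      by_cases hr : kAny "ekonomi" rest
      · simp [hflat, hany, e1', kUpd, hr, PySem.Dict.insert_insert_self, List.append_assoc]
      · simp [hflat, hany, e1', kUpd, hr, kFlat_eq_nil _ _ (by simpa using hr)]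
    by_cases e2 : a.2.2 == "entertaiment"
    · have e2' : a.2.2 = "entertaiment" := by simpa using e2
      rw [if_neg e1]
      rw [if_pos e2]
      by_cases hr : kAny "entertaiment" rest
      · simp [hflat, hany, e2', kUpd, hr, PySem.Dict.insert_insert_self, List.append_assoc]
      · simp [hflat, hany, e2', kUpd, hr, kFlat_eq_nil _ _ (by simpa using hr)]
    by_cases e3 : a.2.2 == "kesehatan"
    · have e3' : a.2.2 = "kesehatan" := by simpa using e3
      rw [if_neg e1]
      rw [if_neg e2]
      rw [if_pos e3]
      by_cases hr : kAny "kesehatan" rest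
      · simp [hflat, hany, e3', kUpd, hr, PySem.Dict.insert_insert_self, List.append_assoc]
      · simp [hflat, hany, e3', kUpd, hr, kFlat_eq_nil _ _ (by simpa using hr)]
    by_cases e4 : a.2.2 == "olahraga"
    · have e4' : a.2.2 = "olahraga" := by simpa using e4
      rw [if_neg e1]
      rw [if_neg e2]
      rw [if_neg e3]
      rw [if_pos e4]
      by_cases hr : kAny "olahraga" rest
      · simp [hflat, hany, e4', kUpd, hr, PySem.Dict.insert_insert_self, List.append_assoc]
      · simp [hflat, hany, e4', kUpd, hr, kFlat_eq_nil _ _ (by simpa using hr)]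
    by_cases e5 : a.2.2 == "teknologi"
    · have e5' : a.2.2 = "teknologi" := by simpa using e5
      rw [if_neg e1]
      rw [if_neg e2]
      rw [if_neg e3]
      rw [if_neg e4]
      rw [if_pos e5]
      by_cases hr : kAny "teknologi" rest
      · simp [hflat, hany, e5', kUpd, hr, PySem.Dict.insert_insert_self, List.append_assoc]
      · simp [hflat, hany, e5', kUpd, hr, kFlat_eq_nil _ _ (by simpa using hr)]
    -- none of the five categories: the row is dropped
    simp only [if_neg e1, if_neg e2, if_neg e3, if_neg e4, if_neg e5]
    simp [hflat, hany, e1, e2, e3, e4, e5, kUpd]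

theorem kUpd_items (c : String) (data : List (String × List String × String)) :
    (kUpd c PySem.Dict.empty [] data).items =
      if kAny c data then [(c, kFlat c data)] else [] := by
  by_cases h : kAny c data <;>
    simp [kUpd, h, PySem.Dict.insert, PySem.Dict.contains, PySem.Dict.empty]

set_option maxHeartbeats 1600000 in
theorem kategori_spec : Claim_equal_kategori := by
  intro data _
  unfold Spec_kategori
  rw [kategori_alt]
  simp only [kategori, kStep_char, kUpd_items]
  by_cases a1 : (data.any fun row => row.2.2 == "ekonomi") = true <;>
    by_cases a2 : (data.any fun row => row.2.2 == "entertaiment") = true <;>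
      by_cases a3 : (data.any fun row => row.2.2 == "kesehatan") = true <;>
        by_cases a4 : (data.any fun row => row.2.2 == "olahraga") = true <;>
          by_cases a5 : (data.any fun row => row.2.2 == "teknologi") = true <;>
            simp [kAny, kFlat, a1, a2, a3, a4, a5, kCats,
              PySem.Dict.update, PySem.Dict.insert, PySem.Dict.contains, PySem.Dict.empty]
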